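-- pv_equiv track=rewrite | github.com/hyesukim1/BertNer | InferenceNer.py | map_labels_to_tokens
-- ===== SOURCE A (Python) =====
-- def map_labels_to_tokens(tokens, predicted_tags):
--     result = {}
--     for token, tag in zip(tokens, predicted_tags):
--         if tag != 'O' and tag not in {'[CLS]', '[SEP]', '[PAD]', '[MASK]'}:  # Exclude special tokens
--             if tag not in result:
--                 result[tag] = token
--             else:
--                 result[tag] += token  # Append subword tokens correctly if needed
--     return result
-- ===== SOURCE B (Python) =====
-- def map_labels_to_tokens(tokens, predicted_tags):
--     # Stage 1: filter once into a flat list of surviving (tag, token) pairs.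
--     pairs = [(tag, token) for token, tag in zip(tokens, predicted_tags)
--              if tag != 'O' and tag not in {'[CLS]', '[SEP]', '[PAD]', '[MASK]'}]
--     # Stage 2: distinct tags in first-occurrence order.
--     seen = []
--     for tag, _ in pairs:
--         if tag not in seen:
--             seen.append(tag)
--     # Stage 3: for each tag, one scan over the pairs collecting and joining its tokens.
--     return {tag: ''.join(tok for t, tok in pairs if t == tag) for tag in seen}
-- ===== Notes on version B (the rewrite author's own statement) =====
-- stated objective: alternative
-- what changed: B replaces A's single pass that maintains a growing dict with a staged algorithm: filter once into a flat (tag, token) pair list, compute the distinct tags in first-occurrence order, then for each distinct tag rescan the pair list and join its tokens; no dict is maintained during traversal.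
import Mathlib
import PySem

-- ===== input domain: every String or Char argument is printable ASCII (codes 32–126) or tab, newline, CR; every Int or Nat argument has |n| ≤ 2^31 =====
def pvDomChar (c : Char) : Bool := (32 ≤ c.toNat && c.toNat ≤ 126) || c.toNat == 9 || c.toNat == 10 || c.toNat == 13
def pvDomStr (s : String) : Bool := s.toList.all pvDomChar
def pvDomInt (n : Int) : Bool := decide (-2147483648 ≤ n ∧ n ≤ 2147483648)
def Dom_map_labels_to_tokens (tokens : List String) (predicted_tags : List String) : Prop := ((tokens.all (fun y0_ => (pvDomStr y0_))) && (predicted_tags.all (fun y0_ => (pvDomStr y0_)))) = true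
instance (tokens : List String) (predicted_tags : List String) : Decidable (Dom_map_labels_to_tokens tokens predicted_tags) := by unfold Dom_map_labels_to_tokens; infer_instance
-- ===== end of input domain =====

-- B replaces A's single pass maintaining a dict with a staged algorithm:
-- filter into a (tag, token) pair list, list the distinct tags in first-occurrence
-- order, then rescan the pair list per tag and join (objective: alternative; same domain, same result).

-- tag filter shared by both sources: tag != 'O' and tag not in {'[CLS]','[SEP]','[PAD]','[MASK]'}
-- ('tag in {…}' ported by hand as membership in the literal list of the set's distinct elements; exact)
def pvKeep (g : String) : Bool :=
  g != "O" && !(["[CLS]", "[SEP]", "[PAD]", "[MASK]"].contains g)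

-- ===== PORT A =====
def map_labels_to_tokens (tokens : List String) (predicted_tags : List String) : List (String × String) :=
  ((tokens.zip predicted_tags).foldl
    (fun result p =>
      if pvKeep p.2 then
        if result.contains p.2 = false then
          result.insert p.2 p.1
        else
          result.insert p.2 (result.getD p.2 "" ++ p.1)
      else result)
    PySem.Dict.empty).items

-- ===== PORT B =====
-- stage 2 of Source B: distinct tags in first-occurrence order
def pvSeen (pairs : List (String × String)) : List String :=
  pairs.foldl (fun acc q => if acc.contains q.1 then acc else acc ++ [q.1]) []

def map_labels_to_tokens_alt (tokens : List String) (predicted_tags : List String) : List (String × String) :=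
  let pairs := ((tokens.zip predicted_tags).filter (fun p => pvKeep p.2)).map (fun p => (p.2, p.1))
  (pvSeen pairs).map (fun g =>
    (g, PySem.Str.join "" ((pairs.filter (fun q => q.1 == g)).map (fun q => q.2))))

-- ===== PRECONDITION & SPEC =====
def Spec_map_labels_to_tokens (tokens : List String) (predicted_tags : List String) (out : List (String × String)) : Prop := out = map_labels_to_tokens_alt tokens predicted_tags
instance (tokens : List String) (predicted_tags : List String) (out : List (String × String)) : Decidable (Spec_map_labels_to_tokens tokens predicted_tags out) := by unfold Spec_map_labels_to_tokens; infer_instance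

-- ===== CLAIM (what is proved, stated in full; the proofs are below) =====
def Claim_equal_map_labels_to_tokens : Prop := ∀ (tokens : List String) (predicted_tags : List String), Dom_map_labels_to_tokens tokens predicted_tags → Spec_map_labels_to_tokens tokens predicted_tags (map_labels_to_tokens tokens predicted_tags)

-- ===== LEMMAS AND PROOFS =====

-- abbreviations for the proof
def pvStepA (result : PySem.Dict String String) (p : String × String) : PySem.Dict String String :=
  if pvKeep p.2 then
    if result.contains p.2 = false then result.insert p.2 p.1
    else result.insert p.2 (result.getD p.2 "" ++ p.1)
  else result

def pvPairs (l : List (String × String)) : List (String × String) :=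
  (l.filter (fun p => pvKeep p.2)).map (fun p => (p.2, p.1))

def pvB (l : List (String × String)) : List (String × String) :=
  (pvSeen (pvPairs l)).map (fun g =>
    (g, PySem.Str.join "" (((pvPairs l).filter (fun q => q.1 == g)).map (fun q => q.2))))

theorem pvIntercalate_nil (l : List (List Char)) : List.intercalate [] l = l.flatten := by
  induction l with
  | nil => rfl
  | cons a t ih =>
    cases t with
    | nil => simp [List.intercalate]
    | cons b t' =>
      simp only [List.intercalate, List.intersperse, List.flatten] at *
      simp_all

theorem pvJoin_append_singleton (L : List String) (t : String) :
    PySem.Str.join "" (L ++ [t]) = PySem.Str.join "" L ++ t := by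
  apply String.ext
  show (PySem.Str.join "" (L ++ [t])).toList = (PySem.Str.join "" L ++ t).toList
  rw [show (PySem.Str.join "" L ++ t).toList = (PySem.Str.join "" L).toList ++ t.toList by simp]
  rw [PySem.Str.toList_join, PySem.Str.toList_join]
  show List.intercalate [] _ = List.intercalate [] _ ++ _
  rw [pvIntercalate_nil, pvIntercalate_nil]
  simp

theorem pvJoin_singleton (t : String) : PySem.Str.join "" [t] = t := by
  have := pvJoin_append_singleton [] t
  simpa using this

-- membership in the first-occurrence list = membership among the keys
theorem pvSeen_aux_mem (P : List (String × String)) (acc : List String) (g : String) :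
    g ∈ P.foldl (fun acc q => if acc.contains q.1 then acc else acc ++ [q.1]) acc
      ↔ g ∈ acc ∨ g ∈ P.map Prod.fst := by
  induction P generalizing acc with
  | nil => simp
  | cons q rest ih =>
    simp only [List.foldl_cons, List.map_cons, List.mem_cons]
    by_cases h : acc.contains q.1 = true
    · rw [if_pos h, ih]
      have hq : q.1 ∈ acc := by simpa using h
      constructor
      · rintro (ha | hr)
        exacts [Or.inl ha, Or.inr (Or.inr hr)]
      · rintro (ha | he | hr)
        exacts [Or.inl ha, Or.inl (he ▸ hq), Or.inr hr]
    · rw [if_neg h, ih]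
      simp only [List.mem_append, List.mem_singleton]
      tauto

theorem pvSeen_mem (P : List (String × String)) (g : String) :
    g ∈ pvSeen P ↔ g ∈ P.map Prod.fst := by
  rw [pvSeen, pvSeen_aux_mem]; simp

-- the first-occurrence list has no duplicates
theorem pvSeen_aux_nodup (P : List (String × String)) (acc : List String) (h : acc.Nodup) :
    (P.foldl (fun acc q => if acc.contains q.1 then acc else acc ++ [q.1]) acc).Nodup := by
  induction P generalizing acc with
  | nil => simpa
  | cons q rest ih =>
    simp only [List.foldl_cons]
    by_cases hc : acc.contains q.1 = true
    · rw [if_pos hc]; exact ih acc h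
    · rw [if_neg hc]
      apply ih
      have hq : q.1 ∉ acc := by simpa using hc
      rw [List.nodup_append]
      refine ⟨h, List.nodup_singleton _, ?_⟩
      intro a ha b hb
      rw [List.mem_singleton] at hb
      subst hb
      exact fun e => hq (e ▸ ha)

theorem pvSeen_nodup (P : List (String × String)) : (pvSeen P).Nodup :=
  pvSeen_aux_nodup P [] List.nodup_nil

-- appending one pair to pvSeen's input
theorem pvSeen_append_singleton (P : List (String × String)) (q : String × String) :
    pvSeen (P ++ [q]) = if (pvSeen P).contains q.1 then pvSeen P else pvSeen P ++ [q.1] := by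
  rw [pvSeen, List.foldl_append]
  rfl

-- main invariant: A's fold produces exactly B's staged result
theorem pvMain (l : List (String × String)) :
    (l.foldl pvStepA PySem.Dict.empty).items = pvB l := by
  induction l using List.reverseRecOn with
  | nil => rfl
  | append_singleton l' p ih =>
    rw [List.foldl_append, List.foldl_cons, List.foldl_nil]
    by_cases hk : pvKeep p.2 = true
    · -- the kept pair becomes (p.2, p.1)
      have hpairs : pvPairs (l' ++ [p]) = pvPairs l' ++ [(p.2, p.1)] := by
        simp [pvPairs, List.filter_append, hk]
      have hkeys : (l'.foldl pvStepA PySem.Dict.empty).keys = pvSeen (pvPairs l') := by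
        show (l'.foldl pvStepA PySem.Dict.empty).items.map Prod.fst = _
        rw [ih, pvB, List.map_map]
        simp [Function.comp_def]
      set d := l'.foldl pvStepA PySem.Dict.empty with hd
      by_cases hc : p.2 ∈ pvSeen (pvPairs l')
      · -- key already present: A updates in place, B's seen list is unchanged
        have hdc : d.contains p.2 = true := by
          rw [PySem.Dict.contains_eq_decide_mem_keys, hkeys]
          exact decide_eq_true hc
        have hcc : (pvSeen (pvPairs l')).contains p.2 = true := by simp [hc]
        have hstep : pvStepA d p = d.insert p.2 (d.getD p.2 "" ++ p.1) := by
          simp [pvStepA, hk, hdc]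
        have hnd : d.keys.Nodup := by rw [hkeys]; exact pvSeen_nodup _
        have hmemitems : (p.2, PySem.Str.join ""
              (((pvPairs l').filter (fun q => q.1 == p.2)).map (fun q => q.2))) ∈ d.items := by
          rw [ih, pvB]
          exact List.mem_map.mpr ⟨p.2, hc, rfl⟩
        have hget : d.getD p.2 "" = PySem.Str.join ""
              (((pvPairs l').filter (fun q => q.1 == p.2)).map (fun q => q.2)) :=
          PySem.Dict.getD_of_mem_items d hmemitems hnd ""
        rw [hstep, PySem.Dict.items_insert_of_contains _ _ hdc, ih, pvB, pvB, hpairs,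
            pvSeen_append_singleton, if_pos hcc, hget, List.map_map]
        apply List.map_congr_left
        intro g hg
        by_cases he : g = p.2
        · subst he
          simp only [Function.comp_def, beq_self_eq_true, if_pos]
          rw [List.filter_append, List.map_append]
          rw [show (([(p.2, p.1)].filter (fun q => q.1 == p.2)) : List (String × String))
                = [(p.2, p.1)] by simp]
          simp [pvJoin_append_singleton]
        · have he1 : (g == p.2) = false := beq_eq_false_iff_ne.mpr he
          have he2 : (p.2 == g) = false := beq_eq_false_iff_ne.mpr (Ne.symm he)
          simp only [Function.comp_def, he1, Bool.false_eq_true, if_neg, not_false_iff]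
          rw [List.filter_append]
          rw [show (([(p.2, p.1)].filter (fun q => q.1 == g)) : List (String × String))
                = [] by simp [he2]]
          simp
      · -- new key: A appends an entry, B's seen list gains p.2 at the end
        have hdc : d.contains p.2 = false := by
          rw [PySem.Dict.contains_eq_decide_mem_keys, hkeys]
          exact decide_eq_false hc
        have hcc : (pvSeen (pvPairs l')).contains p.2 = false := by
          simpa using hc
        have hstep : pvStepA d p = d.insert p.2 p.1 := by
          simp [pvStepA, hk, hdc]
        have hnotkey : p.2 ∉ (pvPairs l').map Prod.fst := fun hm =>
          hc ((pvSeen_mem _ _).mpr hm)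
        have hfilt : (pvPairs l').filter (fun q => q.1 == p.2) = [] := by
          apply List.filter_eq_nil_iff.mpr
          intro q hq
          have : q.1 ≠ p.2 := fun e => hnotkey (e ▸ List.mem_map.mpr ⟨q, hq, rfl⟩)
          simpa using this
        rw [hstep, PySem.Dict.items_insert_of_not_contains _ _ hdc, ih, pvB, pvB, hpairs,
            pvSeen_append_singleton, if_neg (by simpa using hc), List.map_append]
        congr 1
        · apply List.map_congr_left
          intro g hg
          have hgne : (p.2 == g) = false :=
            beq_eq_false_iff_ne.mpr (fun e => hc (e ▸ hg))
          rw [List.filter_append]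
          rw [show (([(p.2, p.1)].filter (fun q => q.1 == g)) : List (String × String))
                = [] by simp [hgne]]
          simp
        · simp only [List.map_cons, List.map_nil]
          rw [List.filter_append, hfilt]
          simp [pvJoin_singleton]
    · -- discarded pair: nothing changes on either side
      have hs : pvStepA (l'.foldl pvStepA PySem.Dict.empty) p = l'.foldl pvStepA PySem.Dict.empty := by
        simp [pvStepA, hk]
      rw [hs, ih]
      have hp : pvPairs (l' ++ [p]) = pvPairs l' := by
        simp [pvPairs, List.filter_append, hk]
      rw [pvB, pvB, hp]

-- ===== VERDICT (by name: the statement is the Claim_ definition above) =====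
theorem map_labels_to_tokens_spec : Claim_equal_map_labels_to_tokens := by
  intro tokens predicted_tags _
  show map_labels_to_tokens tokens predicted_tags = map_labels_to_tokens_alt tokens predicted_tags
  have h := pvMain (tokens.zip predicted_tags)
  unfold map_labels_to_tokens map_labels_to_tokens_alt
  exact h
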